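-- pv_equiv track=rewrite | github.com/GundalaNikhil/DSA | dsa-problems/Bitwise/testcases/generate_all_16_complete.py | sol_011
-- ===== SOURCE A (Python) =====
-- def sol_011(A, B):
--     """BIT-011: Toggle Ranges Minimum Flips"""
--     n = len(A)
--     diff = [A[i] ^ B[i] for i in range(n)]
--     count = 0
--     i = 0
--     while i < n:
--         if diff[i] == 1:
--             count += 1
--             while i < n and diff[i] == 1:
--                 i += 1
--         else:
--             i += 1
--     return count
-- ===== SOURCE B (Python) =====
-- def sol_011(A, B):
--     """BIT-011: Toggle Ranges Minimum Flips"""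
--     d = [(A[i] ^ B[i]) == 1 for i in range(len(A))]
--     return sum(d) - sum(1 for x, y in zip(d, d[1:]) if x and y)
-- ===== Notes on version B (the rewrite author's own statement) =====
-- stated objective: simpler
-- what changed: Replaces the stateful nested-while run scan by the combinatorial identity #runs = #positions with diff==1 minus #adjacent pairs that are both 1, computed from the diff list zipped with its own shift.
import Mathlib
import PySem

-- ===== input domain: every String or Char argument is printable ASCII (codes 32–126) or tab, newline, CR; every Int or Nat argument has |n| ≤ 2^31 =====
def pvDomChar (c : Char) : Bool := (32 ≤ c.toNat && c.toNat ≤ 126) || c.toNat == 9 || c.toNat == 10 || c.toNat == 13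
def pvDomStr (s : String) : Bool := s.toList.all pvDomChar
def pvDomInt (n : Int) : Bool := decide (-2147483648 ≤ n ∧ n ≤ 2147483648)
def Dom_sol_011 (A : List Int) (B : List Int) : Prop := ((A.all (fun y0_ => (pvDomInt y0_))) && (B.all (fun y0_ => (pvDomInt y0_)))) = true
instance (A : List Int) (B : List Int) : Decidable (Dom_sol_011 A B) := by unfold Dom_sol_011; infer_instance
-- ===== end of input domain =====

-- B replaces A's stateful nested-while run scan by the counting identity
-- #runs = #positions with diff==1 − #adjacent pairs both 1; objective: simpler.

-- ===== PORT A =====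
-- inner 'while i < n and diff[i] == 1: i += 1' — skip the current run of 1s
def pvDropRun (d : List Int) : List Int :=
  match d with
  | [] => []
  | x :: rest => if x == 1 then pvDropRun rest else x :: rest

theorem pvDropRun_length_le (d : List Int) : (pvDropRun d).length ≤ d.length := by
  induction d with
  | nil => simp [pvDropRun]
  | cons x rest ih =>
    simp only [pvDropRun]
    split
    · exact Nat.le_succ_of_le ih
    · simp

-- outer while loop over the (remaining) diff list
def pvOuter (d : List Int) : Int :=
  match d with
  | [] => 0
  | x :: rest => if x == 1 then 1 + pvOuter (pvDropRun rest) else pvOuter rest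
termination_by d.length
decreasing_by
  · exact Nat.lt_succ_of_le (pvDropRun_length_le rest)
  · simp

def sol_011 (A : List Int) (B : List Int) : Int :=
  let n := A.length
  let diff := (List.range n).map
    (fun (i : Nat) => Int.xor ((PySem.List.pyGet? A (i : Int)).getD 0) ((PySem.List.pyGet? B (i : Int)).getD 0))
  pvOuter diff

-- ===== PORT B =====
-- d = [(A[i] ^ B[i]) == 1 for i in range(len(A))]; sum(d) - sum(1 for x,y in zip(d, d[1:]) if x and y)
def sol_011_alt (A : List Int) (B : List Int) : Int :=
  let d := (List.range A.length).map
    (fun (i : Nat) => (Int.xor ((PySem.List.pyGet? A (i : Int)).getD 0) ((PySem.List.pyGet? B (i : Int)).getD 0)) == 1)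
  ((d.countP id : Nat) : Int) - (((List.zipWith (fun x y => x && y) d d.tail).countP id : Nat) : Int)

-- ===== PRECONDITION & SPEC =====
-- Pre_ excludes exactly the inputs where A raises IndexError (B shorter than A)
def Pre_sol_011 (A : List Int) (B : List Int) : Prop := A.length ≤ B.length
instance (A : List Int) (B : List Int) : Decidable (Pre_sol_011 A B) := by unfold Pre_sol_011; infer_instance
def pvWitness_sol_011 : List Int × List Int := ([1, 0, 3, 1], [0, 0, 2, 0])

def Spec_sol_011 (A : List Int) (B : List Int) (out : Int) : Prop := out = sol_011_alt A B
instance (A : List Int) (B : List Int) (out : Int) : Decidable (Spec_sol_011 A B out) := by unfold Spec_sol_011; infer_instance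

-- ===== CLAIM (what is proved, stated in full; the proofs are below) =====
def Claim_equal_sol_011 : Prop := ∀ (A : List Int) (B : List Int), Dom_sol_011 A B → Pre_sol_011 A B → Spec_sol_011 A B (sol_011 A B)

-- ===== LEMMAS AND PROOFS =====

-- rising-edge counter over the diff list (proof intermediate between A's run scan and B's identity)
def pvEdgeD (d : List Int) (prev : Bool) : Int :=
  match d with
  | [] => 0
  | x :: rest => (if (x == 1) && !prev then 1 else 0) + pvEdgeD rest (x == 1)

-- number of positions whose diff is 1
def pvOnes (d : List Int) : Int := (d.countP (fun x => x == 1) : Nat)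

-- number of adjacent pairs both 1, with 'prev' carrying the previous position's diff
def pvAdj (prev : Bool) (d : List Int) : Int :=
  match d with
  | [] => 0
  | x :: rest => (if prev && (x == 1) then 1 else 0) + pvAdj (x == 1) rest

-- edge counting equals A's run counting
theorem pvEdgeD_eq_outer (d : List Int) (prev : Bool) :
    pvEdgeD d prev = pvOuter (if prev then pvDropRun d else d) := by
  induction d generalizing prev with
  | nil => cases prev <;> simp [pvEdgeD, pvOuter, pvDropRun]
  | cons x rest ih =>
    by_cases hx : x = 1
    · subst hx
      cases prev <;> simp [pvEdgeD, pvOuter, pvDropRun, ih true]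
    · have hx' : (x == 1) = false := by simp [hx]
      cases prev <;> simp [pvEdgeD, pvOuter, pvDropRun, hx', ih false]

-- edge counting equals ones minus adjacent pairs
theorem pvEdgeD_eq_ones_sub_adj (d : List Int) (prev : Bool) :
    pvEdgeD d prev = pvOnes d - pvAdj prev d := by
  induction d generalizing prev with
  | nil => simp [pvEdgeD, pvOnes, pvAdj]
  | cons x rest ih =>
    simp only [pvEdgeD, pvOnes, pvAdj, List.countP_cons, ih]
    cases hx : (x == 1) <;> cases prev <;>
      simp <;> ring

-- the zipped pair count of B equals pvAdj
theorem pvZip_count_eq_adj (d : List Int) (prev : Bool) :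
    (((List.zipWith (fun x y => x && y) (prev :: d.map (fun x => x == 1)) (d.map (fun x => x == 1))).countP id : Nat) : Int)
      = pvAdj prev d := by
  induction d generalizing prev with
  | nil => simp [pvAdj]
  | cons x rest ih =>
    simp only [List.map_cons, List.zipWith_cons_cons, List.countP_cons, pvAdj, ← ih (x == 1)]
    cases hp : (prev && (x == 1)) <;> simp <;> omega

theorem pvMain (d : List Int) :
    pvOuter d =
      (((d.map (fun x => x == 1)).countP id : Nat) : Int)
        - (((List.zipWith (fun x y => x && y) (d.map (fun x => x == 1)) (d.map (fun x => x == 1)).tail).countP id : Nat) : Int) := by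
  have hones : (((d.map (fun x => x == 1)).countP id : Nat) : Int) = pvOnes d := by
    simp [pvOnes, List.countP_map]
  cases d with
  | nil => simp [pvOuter, pvOnes] at *
  | cons x rest =>
    have h1 := pvEdgeD_eq_outer (x :: rest) false
    have h2 := pvEdgeD_eq_ones_sub_adj (x :: rest) false
    simp only [Bool.false_eq_true, if_false] at h1
    rw [← h1, h2, hones]
    congr 1
    rw [List.map_cons, List.tail_cons, pvZip_count_eq_adj rest (x == 1)]
    simp [pvAdj]

-- ===== VERDICT (by name: the statement is the Claim_ definition above) =====
theorem sol_011_spec : Claim_equal_sol_011 := by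
  intro A B _ _
  show sol_011 A B = sol_011_alt A B
  simp only [sol_011, sol_011_alt]
  rw [pvMain]
  congr 1 <;> simp [List.map_map, Function.comp_def]
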